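-- pv_equiv track=rewrite | github.com/aka-somix/controllo-programmazione-settimanale | modules/util.py | check_repetitions
-- ===== SOURCE A (Python) =====
-- from typing import List
--
-- def check_repetitions(array) -> List:
--     rep_map = {}
--     for elem in array:
--         key = elem.__str__()
--         if key in rep_map.keys():
--             rep_map[key].append(elem)
--         else:
--             rep_map[key] = [elem]
--     return list(filter(lambda array: len(array)> 1, rep_map.values()))
-- ===== SOURCE B (Python) =====
-- def check_repetitions(array):
--     counts = {}
--     for elem in array:
--         key = elem.__str__()
--         counts[key] = counts.get(key, 0) + 1
--     groups = {}
--     for elem in array: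
--         key = elem.__str__()
--         if counts[key] > 1:
--             groups.setdefault(key, []).append(elem)
--     return list(groups.values())
-- ===== Notes on version B (the rewrite author's own statement) =====
-- stated objective: alternative
-- what changed: Replaces the build-all-groups-then-filter single pass with a count-first, collect-second two-pass decomposition: a first pass counts each key, a second pass collects only elements whose key occurs more than once, so no singleton groups are ever built and no final filter is needed.
import Mathlib
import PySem

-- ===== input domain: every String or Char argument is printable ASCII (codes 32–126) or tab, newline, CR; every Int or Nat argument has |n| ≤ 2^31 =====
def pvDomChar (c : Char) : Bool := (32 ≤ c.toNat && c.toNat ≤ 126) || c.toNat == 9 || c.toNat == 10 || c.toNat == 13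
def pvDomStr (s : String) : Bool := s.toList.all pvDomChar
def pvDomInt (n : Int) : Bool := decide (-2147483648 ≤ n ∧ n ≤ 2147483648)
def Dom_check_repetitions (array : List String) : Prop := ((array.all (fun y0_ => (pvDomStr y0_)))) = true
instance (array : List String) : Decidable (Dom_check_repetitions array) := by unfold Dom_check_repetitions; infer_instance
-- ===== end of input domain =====

-- B groups duplicates by a count-first, collect-second two-pass scheme instead of A's
-- build-all-groups-then-filter pass; same return value, no speed claim.

-- ===== PORT A =====
-- rep_map = {}; for elem in array: key = elem.__str__(); if key in rep_map.keys(): append else new;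
-- return list(filter(lambda a: len(a) > 1, rep_map.values()))
-- (elem.__str__() on a str is the string itself)
def check_repetitions (array : List String) : List (List String) :=
  let rep_map : PySem.Dict String (List String) :=
    array.foldl (fun m elem =>
      -- key := elem.__str__() = elem
      if m.contains elem then
        m.modify elem [] (fun l => l ++ [elem])      -- rep_map[key].append(elem)
      else
        m.insert elem [elem]) PySem.Dict.empty
  rep_map.values.filter (fun a => a.length > 1)

-- ===== PORT B =====
-- counts = {}; for elem: counts[key] = counts.get(key, 0) + 1
-- groups = {}; for elem: if counts[key] > 1: groups.setdefault(key, []).append(elem)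
-- (setdefault(key, []).append(elem) is exactly Dict.modify key [] (· ++ [elem]);
--  counts[key] is getD … 0, exact here since key is always present after pass 1)
def check_repetitions_alt (array : List String) : List (List String) :=
  let counts : PySem.Dict String Int :=
    array.foldl (fun c elem =>
      c.insert elem (c.getD elem 0 + 1)) PySem.Dict.empty
  let groups : PySem.Dict String (List String) :=
    array.foldl (fun g elem =>
      if counts.getD elem 0 > 1 then
        g.modify elem [] (fun l => l ++ [elem])
      else g) PySem.Dict.empty
  groups.values

-- ===== PRECONDITION & SPEC =====
def Spec_check_repetitions (array : List String) (out : List (List String)) : Prop := out = check_repetitions_alt array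
instance (array : List String) (out : List (List String)) : Decidable (Spec_check_repetitions array out) := by unfold Spec_check_repetitions; infer_instance

-- ===== CLAIM (what is proved, stated in full; the proofs are below) =====
def Claim_equal_check_repetitions : Prop := ∀ (array : List String), Dom_check_repetitions array → Spec_check_repetitions array (check_repetitions array)

-- ===== LEMMAS AND PROOFS =====

-- A's branch is exactly Dict.modify with default []
theorem stepA_eq_modify (m : PySem.Dict String (List String)) (e : String) :
    (if m.contains e then m.modify e [] (fun l => l ++ [e]) else m.insert e [e])
      = m.modify e [] (fun l => l ++ [e]) := by
  cases h : m.contains e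
  · simp only [Bool.false_eq_true, if_false, PySem.Dict.modify,
      PySem.Dict.getD_of_not_contains m [] h, List.nil_append]
  · simp [PySem.Dict.modify]

-- a guarded fold is a fold over the filtered list
theorem foldl_guard {α β : Type} (P : α → Prop) [DecidablePred P] (f : β → α → β) :
    ∀ (l : List α) (init : β),
      l.foldl (fun s e => if P e then f s e else s) init
        = (l.filter (fun e => decide (P e))).foldl f init := by
  intro l
  induction l with
  | nil => intro init; rfl
  | cons x xs ih =>
    intro init
    by_cases h : P x <;> simp [h, ih]

-- dedup-in-order commutes with filter
theorem ofList_filter {α : Type} [BEq α] [LawfulBEq α] (p : α → Bool) :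
    ∀ (l : List α) (s : PySem.Set α),
      (l.filter p).foldl PySem.Set.add (s.filter p) = (l.foldl PySem.Set.add s).filter p := by
  intro l
  induction l with
  | nil => intro s; rfl
  | cons x xs ih =>
    intro s
    by_cases hp : p x
    · rw [List.filter_cons_of_pos hp]
      simp only [List.foldl_cons]
      have : PySem.Set.add (s.filter p) x = (PySem.Set.add s x).filter p := by
        by_cases hm : x ∈ s
        · simp [PySem.Set.add, PySem.Set.contains, hm, List.mem_filter, hp]
        · simp [PySem.Set.add, PySem.Set.contains, hm, List.mem_filter, hp,
            List.filter_append, List.filter_cons, List.filter_nil]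
      rw [this, ih]
    · rw [List.filter_cons_of_neg hp]
      simp only [List.foldl_cons]
      have : (PySem.Set.add s x).filter p = s.filter p := by
        by_cases hm : x ∈ s
        · simp [PySem.Set.add, PySem.Set.contains, hm]
        · simp [PySem.Set.add, PySem.Set.contains, hm, List.filter_append,
            hp, List.filter_nil]
      rw [← ih (PySem.Set.add s x), this]

theorem set_ofList_filter {α : Type} [BEq α] [LawfulBEq α] (p : α → Bool) (l : List α) :
    PySem.Set.ofList (l.filter p) = (PySem.Set.ofList l).filter p := by
  have := ofList_filter p l []
  simpa [PySem.Set.ofList_eq_foldl] using this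

-- the grouping fold, characterised: keys and entries
def pvGroup (l : List α) [BEq α] : PySem.Dict α (List α) :=
  l.foldl (fun d e => d.modify e [] (fun v => v ++ [e])) PySem.Dict.empty

theorem pvGroup_getD {α : Type} [BEq α] [LawfulBEq α] (l : List α) (c : α) :
    (pvGroup l).getD c [] = l.filter (fun x => x == c) := by
  unfold pvGroup
  have h : l.foldl (fun d e => d.modify e [] (fun v => v ++ [e])) PySem.Dict.empty
      = (l.map (fun e => (e, e))).foldl (fun d p => d.modify p.1 [] (fun v => v ++ [p.2])) PySem.Dict.empty := by
    rw [List.foldl_map]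
  rw [h, PySem.Dict.getD_foldl_modify_append]
  simp [PySem.Dict.getD_empty, List.filter_map, Function.comp_def]

theorem pvGroup_keys {α : Type} [BEq α] [LawfulBEq α] (l : List α) :
    (pvGroup l).keys = PySem.Set.ofList l := by
  unfold pvGroup
  have h : l.foldl (fun d e => d.modify e [] (fun v => v ++ [e])) PySem.Dict.empty
      = l.foldl (fun d e => d.modify ((fun x => x) e) [] ((fun (_ : PySem.Dict α (List α)) (x : α) => fun v => v ++ [x]) d e)) PySem.Dict.empty := rfl
  rw [h, PySem.Dict.keys_foldl_modify_key]
  simp [PySem.Dict.keys_empty, PySem.Set.update_nil_left]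

theorem pvGroup_values {α : Type} [BEq α] [LawfulBEq α] (l : List α) :
    (pvGroup l).values = (PySem.Set.ofList l).map (fun k => l.filter (fun x => x == k)) := by
  have hnd : (pvGroup l).keys.Nodup := by
    rw [pvGroup_keys]; exact PySem.Set.nodup_ofList l
  rw [PySem.Dict.values_eq_map_keys _ hnd [], pvGroup_keys]
  exact List.map_congr_left (fun k _ => pvGroup_getD l k)

theorem check_repetitions_spec_aux (array : List String) :
    check_repetitions array = check_repetitions_alt array := by
  -- normalise A to pvGroup
  have hA : check_repetitions array
      = ((pvGroup array).values).filter (fun a => a.length > 1) := by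
    unfold check_repetitions pvGroup
    have hf : (fun (m : PySem.Dict String (List String)) (elem : String) =>
        if m.contains elem then m.modify elem [] (fun l => l ++ [elem]) else m.insert elem [elem])
        = fun m elem => m.modify elem [] (fun l => l ++ [elem]) :=
      funext fun m => funext fun e => stepA_eq_modify m e
    rw [hf]
  -- normalise B: counts is Counter, the guarded fold is pvGroup of the filtered list
  have hB : check_repetitions_alt array
      = (pvGroup (array.filter (fun e => decide ((array.count e : Int) > 1)))).values := by
    unfold check_repetitions_alt pvGroup
    simp only [PySem.Dict.foldl_insert_getD_add_one_eq_counter]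
    refine Eq.trans (congrArg PySem.Dict.values
      (foldl_guard (P := fun e => (PySem.Dict.counter array).getD e 0 > 1)
        (f := fun (g : PySem.Dict String (List String)) elem => g.modify elem [] (fun l => l ++ [elem]))
        array PySem.Dict.empty)) ?_
    have hfl : array.filter (fun e => decide ((PySem.Dict.counter array).getD e 0 > 1))
        = array.filter (fun e => decide ((array.count e : Int) > 1)) :=
      List.filter_congr (fun e _ => by simp [PySem.Dict.getD_counter])
    rw [hfl]
  rw [hA, hB]
  set p : String → Bool := fun e => decide ((array.count e : Int) > 1) with hp
  have hpc : ∀ e : String, p e = decide (1 < array.count e) := by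
    intro e; simp [hp]
  rw [pvGroup_values, pvGroup_values, set_ofList_filter, List.filter_map]
  have hfilt : ((PySem.Set.ofList array).filter
        ((fun (a : List String) => decide (a.length > 1)) ∘ fun k => array.filter (fun x => x == k)))
      = (PySem.Set.ofList array).filter p := by
    apply List.filter_congr
    intro k _
    simp only [Function.comp_def, hp, List.count_eq_countP, ← List.countP_eq_length_filter,
      Nat.one_lt_cast, gt_iff_lt]
  refine Eq.trans (congrArg _ hfilt) ?_
  apply List.map_congr_left
  intro k hk
  rw [List.mem_filter] at hk
  rw [List.filter_filter]
  apply List.filter_congr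
  intro x _
  by_cases hx : x = k
  · subst hx
    simp [hk.2]
  · simp [hx]

-- ===== VERDICT (by name: the statement is the Claim_ definition above) =====
theorem check_repetitions_spec : Claim_equal_check_repetitions := by
  intro array _
  exact check_repetitions_spec_aux array
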